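-- pv_equiv track=rewrite | github.com/nehachede/CSCI-B-505-AA-Fall23 | Assignments/5/assgn5.py | shorterBuildings
-- ===== SOURCE A (Python) =====
-- def shorterBuildings(heights):
--     def msort(inp):
--         if len(inp) <= 1:
--             return inp
--
--         mid = len(inp) // 2
--         l = inp[:mid]
--         r = inp[mid:]
--
--         return merge(msort(l), msort(r))
--
--     def merge(l, r):
--         result = []
--         i = j = 0
--         while i < len(l) or j < len(r):
--             if j == len(r) or (i < len(l) and l[i][1] <= r[j][1]):
--                 result.append(l[i])
--                 res[l[i][0]] += j
--                 i += 1
--             else: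
--                 result.append(r[j])
--                 j += 1
--         return result
--
--     n = len(heights)
--     res = [0] * n
--     inp = list(enumerate(heights))
--     msort(inp)
--
--     return res
-- ===== SOURCE B (Python) =====
-- def shorterBuildings(heights):
--     return [sum(1 for h in heights[i + 1:] if h < heights[i]) for i in range(len(heights))]
-- ===== Notes on version B (the rewrite author's own statement) =====
-- stated objective: simpler
-- what changed: Replaces the merge-sort inversion counting (with its in-place res mutation inside merge) by a one-line direct count: for each i, count the strictly smaller heights to its right.
import Mathlib
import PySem

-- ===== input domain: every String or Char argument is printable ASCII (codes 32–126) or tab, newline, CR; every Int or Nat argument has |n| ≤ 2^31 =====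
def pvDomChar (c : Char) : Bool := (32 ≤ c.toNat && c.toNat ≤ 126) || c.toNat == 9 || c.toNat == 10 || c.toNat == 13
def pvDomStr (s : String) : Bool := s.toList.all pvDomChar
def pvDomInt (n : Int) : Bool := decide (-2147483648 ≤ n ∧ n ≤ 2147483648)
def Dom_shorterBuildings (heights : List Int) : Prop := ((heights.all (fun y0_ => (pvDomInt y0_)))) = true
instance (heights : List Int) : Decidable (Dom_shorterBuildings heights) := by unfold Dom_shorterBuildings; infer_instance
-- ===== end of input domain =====

-- B replaces A's merge-sort inversion count by the direct per-index count of strictly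
-- smaller heights to the right (simpler; O(n^2) vs A's O(n log n)).

-- ===== PORT A =====
-- res[p] += v. Python indexes res with p = an enumerate index, always 0 ≤ p < len(res),
-- where List.set / List.getD are exact.
def pvAddAt (res : List Int) (p : Int) (v : Int) : List Int :=
  res.set p.toNat (res.getD p.toNat 0 + v)

-- the while-loop of `merge`: i/j cursors become the remaining suffixes of l and r; the
-- argument j carries Python's j (number of r-elements consumed so far).  The leading Nat
-- is fuel (callers pass l.length + r.length, so the 0-case is never reached): it only
-- makes the recursion structural.
def mergeA : Nat → List (Int × Int) → List (Int × Int) → Int → List Int → List (Int × Int) × List Int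
  | 0, _, _, _, res => ([], res)
  | _ + 1, [], [], _, res => ([], res)
  | f + 1, [], rj :: r', j, res =>
      let pr := mergeA f [] r' (j + 1) res
      (rj :: pr.1, pr.2)
  | f + 1, li :: l', [], j, res =>
      let pr := mergeA f l' [] j (pvAddAt res li.1 j)
      (li :: pr.1, pr.2)
  | f + 1, li :: l', rj :: r', j, res =>
      if li.2 ≤ rj.2 then
        let pr := mergeA f l' (rj :: r') j (pvAddAt res li.1 j)
        (li :: pr.1, pr.2)
      else
        let pr := mergeA f (li :: l') r' (j + 1) res
        (rj :: pr.1, pr.2)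

-- msort; len(inp)//2 on a Nat length is Nat division, exact.  The leading Nat is fuel
-- (callers pass inp.length, an upper bound on the recursion depth's list lengths, so the
-- 0-case only ever sees inp = [], which it returns like the len <= 1 base case).
def msortA : Nat → List (Int × Int) → List Int → List (Int × Int) × List Int
  | 0, inp, res => (inp, res)
  | f + 1, inp, res =>
    if inp.length ≤ 1 then (inp, res)
    else
      let mid := inp.length / 2
      let pl := msortA f (inp.take mid) res
      let pr := msortA f (inp.drop mid) pl.2
      mergeA (pl.1.length + pr.1.length) pl.1 pr.1 0 pr.2

def shorterBuildings (heights : List Int) : List Int :=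
  (msortA (PySem.List.enumerate heights 0).length (PySem.List.enumerate heights 0)
    (List.replicate heights.length 0)).2

-- ===== PORT B =====
-- heights[i+1:] for 0 ≤ i is List.drop (i+1); heights[i] for i < len is List.getD i 0 (exact there).
def shorterBuildings_alt (heights : List Int) : List Int :=
  (List.range heights.length).map (fun i =>
    (((heights.drop (i + 1)).filter (fun h => h < heights.getD i 0)).length : Int))

-- ===== PRECONDITION & SPEC =====
def Spec_shorterBuildings (heights : List Int) (out : List Int) : Prop := out = shorterBuildings_alt heights
instance (heights : List Int) (out : List Int) : Decidable (Spec_shorterBuildings heights out) := by unfold Spec_shorterBuildings; infer_instance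

-- ===== CLAIM (what is proved, stated in full; the proofs are below) =====
def Claim_equal_shorterBuildings : Prop := ∀ (heights : List Int), Dom_shorterBuildings heights → Spec_shorterBuildings heights (shorterBuildings heights)

-- ===== LEMMAS AND PROOFS =====

-- number of elements of r whose snd is < h (as an Int, matching res arithmetic)
def pvCntLt (h : Int) (r : List (Int × Int)) : Int :=
  ((r.filter (fun x => x.2 < h)).length : Int)

-- total increment that a run of `merge l r` starting at counter j contributes to res[k]
def pvSm : List (Int × Int) → List (Int × Int) → Int → Int → Int
  | [], _, _, _ => 0
  | x :: t, r, j, k => (if x.1 = k then j + pvCntLt x.2 r else 0) + pvSm t r j k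

-- total increment that the whole mergesort of inp contributes to res[k]
def pvS : List (Int × Int) → Int → Int
  | [], _ => 0
  | x :: t, k => (if x.1 = k then pvCntLt x.2 t else 0) + pvS t k

theorem pvAddAt_length (res : List Int) (p v : Int) :
    (pvAddAt res p v).length = res.length := by
  simp [pvAddAt]


theorem pvAddAt_getD (res : List Int) (p v : Int) (k : Nat)
    (hp : 0 ≤ p) (hk : k < res.length) :
    (pvAddAt res p v).getD k 0 = res.getD k 0 + (if p = (k : Int) then v else 0) := by
  unfold pvAddAt
  by_cases hpk : p = (k : Int)
  · rw [hpk]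
    simp [List.getD, hk]
  · have hne : p.toNat ≠ k := by omega
    simp [hpk, List.getD, List.getElem?_set_ne hne]


theorem pvCntLt_eq_zero (h : Int) (r : List (Int × Int)) (hr : ∀ y ∈ r, ¬ y.2 < h) :
    pvCntLt h r = 0 := by
  have h0 : r.filter (fun x => decide (x.2 < h)) = [] :=
    List.filter_eq_nil_iff.mpr (by simpa using hr)
  simp [pvCntLt, h0]


theorem pvSm_shift (l : List (Int × Int)) (rj : Int × Int) (r' : List (Int × Int)) (j k : Int)
    (hl : ∀ y ∈ l, rj.2 < y.2) :
    pvSm l (rj :: r') j k = pvSm l r' (j + 1) k := by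
  induction l with
  | nil => simp [pvSm]
  | cons x t ih =>
    have hx : rj.2 < x.2 := hl x (by simp)
    have ht : ∀ y ∈ t, rj.2 < y.2 := fun y hy => hl y (by simp [hy])
    simp only [pvSm, ih ht]
    congr 1
    split_ifs with h
    · simp only [pvCntLt, List.filter_cons, decide_eq_true_eq]
      rw [if_pos hx]
      push_cast [List.length_cons]
      ring
    · rfl


theorem pvSm_perm_left {l l' : List (Int × Int)} (r : List (Int × Int)) (j k : Int)
    (hp : l.Perm l') : pvSm l r j k = pvSm l' r j k := by
  have e : ∀ m : List (Int × Int), pvSm m r j k =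
      (m.map (fun x => if x.1 = k then j + pvCntLt x.2 r else 0)).sum := by
    intro m; induction m with
    | nil => simp [pvSm]
    | cons x t ih => simp [pvSm, ih]
  rw [e, e, (hp.map _).sum_eq]


theorem pvSm_perm_right (l : List (Int × Int)) {r r' : List (Int × Int)} (j k : Int)
    (hp : r.Perm r') : pvSm l r j k = pvSm l r' j k := by
  induction l with
  | nil => simp [pvSm]
  | cons x t ih =>
    have hc : pvCntLt x.2 r = pvCntLt x.2 r' := by
      simp [pvCntLt, (hp.filter _).length_eq]
    simp [pvSm, ih, hc]


theorem pvS_append (l r : List (Int × Int)) (k : Int) :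
    pvS (l ++ r) k = pvS l k + pvS r k + pvSm l r 0 k := by
  induction l with
  | nil => simp [pvS, pvSm]
  | cons x t ih =>
    have hc : pvCntLt x.2 (t ++ r) = pvCntLt x.2 t + pvCntLt x.2 r := by
      simp [pvCntLt, List.filter_append]
    simp only [List.cons_append, pvS, pvSm, ih, hc]
    split_ifs <;> ring


theorem pvCntLt_enumerate (h : Int) (t : List Int) (s : Int) :
    pvCntLt h (PySem.List.enumerate t s) = ((t.filter (fun x => x < h)).length : Int) := by
  induction t generalizing s with
  | nil => simp [pvCntLt, PySem.List.enumerate_nil]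
  | cons x t ih =>
    simp only [pvCntLt, PySem.List.enumerate_cons, List.filter_cons]
    by_cases hx : x < h
    · rw [if_pos (by simpa using hx), if_pos (by simpa using hx)]
      have h2 := ih (s + 1)
      simp only [pvCntLt] at h2
      simp only [List.length_cons]
      push_cast at h2 ⊢
      omega
    · rw [if_neg (by simpa using hx), if_neg (by simpa using hx)]
      simpa [pvCntLt] using ih (s + 1)


theorem pvS_enumerate_lt (t : List Int) (s k : Int) (hk : k < s) :
    pvS (PySem.List.enumerate t s) k = 0 := by
  induction t generalizing s with
  | nil => simp [pvS, PySem.List.enumerate_nil]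
  | cons x t ih =>
    have hs : s ≠ k := by omega
    simp only [pvS, PySem.List.enumerate_cons]
    rw [if_neg hs, ih (s + 1) (by omega)]
    ring


theorem pvS_enumerate (t : List Int) : ∀ (k : Nat) (s : Int),
    pvS (PySem.List.enumerate t s) (s + (k : Int)) =
      (((t.drop (k + 1)).filter (fun h => h < t.getD k 0)).length : Int) := by
  intro k
  induction t generalizing k with
  | nil => intro s; simp [pvS, PySem.List.enumerate_nil]
  | cons x t ih =>
    intro s
    cases k with
    | zero =>
      have h1 : pvS (PySem.List.enumerate t (s + 1)) s = 0 :=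
        pvS_enumerate_lt t (s + 1) s (by omega)
      simp [pvS, PySem.List.enumerate_cons, h1, pvCntLt_enumerate]
    | succ k' =>
      have hne : ¬ (s = s + ((k' + 1 : Nat) : Int)) := by push_cast; omega
      have e : s + ((k' + 1 : Nat) : Int) = (s + 1) + (k' : Int) := by push_cast; ring
      simp only [pvS, PySem.List.enumerate_cons]
      rw [if_neg hne, e, ih k' (s + 1)]
      simp



theorem mergeA_fst_perm_length : ∀ (f : Nat) (l r : List (Int × Int)) (j : Int) (res : List Int),
    l.length + r.length ≤ f →
    (mergeA f l r j res).1.Perm (l ++ r) ∧ (mergeA f l r j res).2.length = res.length := by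
  intro f
  induction f with
  | zero =>
    intro l r j res hf
    rcases l with _ | ⟨li, l'⟩
    · rcases r with _ | ⟨rj, r'⟩
      · simp [mergeA]
      · simp at hf
    · simp at hf
  | succ f ih =>
    intro l r j res hf
    rcases l with _ | ⟨li, l'⟩
    · rcases r with _ | ⟨rj, r'⟩
      · simp [mergeA]
      · have h' := ih [] r' (j + 1) res (by simp at hf ⊢; omega)
        simp only [mergeA]
        exact ⟨h'.1.cons rj, h'.2⟩
    · rcases r with _ | ⟨rj, r'⟩
      · have h' := ih l' [] j (pvAddAt res li.1 j) (by simp at hf ⊢; omega)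
        simp only [mergeA]
        refine ⟨h'.1.cons li, ?_⟩
        rw [h'.2, pvAddAt_length]
      · by_cases h : li.2 ≤ rj.2
        · have h' := ih l' (rj :: r') j (pvAddAt res li.1 j) (by simp at hf ⊢; omega)
          simp only [mergeA, if_pos h]
          refine ⟨h'.1.cons li, ?_⟩
          rw [h'.2, pvAddAt_length]
        · have h' := ih (li :: l') r' (j + 1) res (by simp at hf ⊢; omega)
          simp only [mergeA, if_neg h]
          exact ⟨(h'.1.cons rj).trans List.perm_middle.symm, h'.2⟩

theorem mergeA_sorted : ∀ (f : Nat) (l r : List (Int × Int)) (j : Int) (res : List Int),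
    l.length + r.length ≤ f →
    l.Pairwise (fun a b => a.2 ≤ b.2) → r.Pairwise (fun a b => a.2 ≤ b.2) →
    (mergeA f l r j res).1.Pairwise (fun a b => a.2 ≤ b.2) := by
  intro f
  induction f with
  | zero =>
    intro l r j res hf _ _
    rcases l with _ | ⟨li, l'⟩
    · rcases r with _ | ⟨rj, r'⟩
      · simp [mergeA]
      · simp at hf
    · simp at hf
  | succ f ih =>
    intro l r j res hf hl hr
    rcases l with _ | ⟨li, l'⟩
    · rcases r with _ | ⟨rj, r'⟩
      · simp [mergeA]
      · have hf' : ([] : List (Int × Int)).length + r'.length ≤ f := by simp at hf ⊢; omega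
        rw [List.pairwise_cons] at hr
        simp only [mergeA]
        rw [List.pairwise_cons]
        refine ⟨?_, ih [] r' (j + 1) res hf' hl hr.2⟩
        intro y hy
        have hmem := (mergeA_fst_perm_length f [] r' (j + 1) res hf').1.mem_iff.mp hy
        exact hr.1 y (by simpa using hmem)
    · rcases r with _ | ⟨rj, r'⟩
      · have hf' : l'.length + ([] : List (Int × Int)).length ≤ f := by simp at hf ⊢; omega
        rw [List.pairwise_cons] at hl
        simp only [mergeA]
        rw [List.pairwise_cons]
        refine ⟨?_, ih l' [] j (pvAddAt res li.1 j) hf' hl.2 hr⟩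
        intro y hy
        have hmem := (mergeA_fst_perm_length f l' [] j (pvAddAt res li.1 j) hf').1.mem_iff.mp hy
        exact hl.1 y (by simpa using hmem)
      · by_cases h : li.2 ≤ rj.2
        · have hf' : l'.length + (rj :: r').length ≤ f := by simp at hf ⊢; omega
          rw [List.pairwise_cons] at hl
          simp only [mergeA, if_pos h]
          rw [List.pairwise_cons]
          refine ⟨?_, ih l' (rj :: r') j (pvAddAt res li.1 j) hf' hl.2 hr⟩
          intro y hy
          have hmem := (mergeA_fst_perm_length f l' (rj :: r') j (pvAddAt res li.1 j) hf').1.mem_iff.mp hy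
          rw [List.mem_append] at hmem
          rcases hmem with hmem | hmem
          · exact hl.1 y hmem
          · rcases List.mem_cons.mp hmem with rfl | hmem
            · exact h
            · exact le_trans h ((List.pairwise_cons.mp hr).1 y hmem)
        · have hf' : (li :: l').length + r'.length ≤ f := by simp at hf ⊢; omega
          rw [List.pairwise_cons] at hr
          simp only [mergeA, if_neg h]
          rw [List.pairwise_cons]
          refine ⟨?_, ih (li :: l') r' (j + 1) res hf' hl hr.2⟩
          intro y hy
          have hmem := (mergeA_fst_perm_length f (li :: l') r' (j + 1) res hf').1.mem_iff.mp hy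
          rw [List.mem_append] at hmem
          have hlt : rj.2 < li.2 := not_le.mp h
          rcases hmem with hmem | hmem
          · rcases List.mem_cons.mp hmem with rfl | hmem
            · exact le_of_lt hlt
            · exact le_of_lt (lt_of_lt_of_le hlt ((List.pairwise_cons.mp hl).1 y hmem))
          · exact hr.1 y hmem

theorem mergeA_getD : ∀ (f : Nat) (l r : List (Int × Int)) (j : Int) (res : List Int) (k : Nat),
    l.length + r.length ≤ f →
    (∀ x ∈ l, 0 ≤ x.1) →
    l.Pairwise (fun a b => a.2 ≤ b.2) → r.Pairwise (fun a b => a.2 ≤ b.2) →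
    k < res.length →
    ((mergeA f l r j res).2).getD k 0 = res.getD k 0 + pvSm l r j (k : Int) := by
  intro f
  induction f with
  | zero =>
    intro l r j res k hf _ _ _ _
    rcases l with _ | ⟨li, l'⟩
    · rcases r with _ | ⟨rj, r'⟩
      · simp [mergeA, pvSm]
      · simp at hf
    · simp at hf
  | succ f ih =>
    intro l r j res k hf hfst hl hr hk
    rcases l with _ | ⟨li, l'⟩
    · rcases r with _ | ⟨rj, r'⟩
      · simp [mergeA, pvSm]
      · have hf' : ([] : List (Int × Int)).length + r'.length ≤ f := by simp at hf ⊢; omega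
        simp only [mergeA]
        rw [ih [] r' (j + 1) res k hf' hfst hl (List.pairwise_cons.mp hr).2 hk]
        simp [pvSm]
    · rcases r with _ | ⟨rj, r'⟩
      · have hf' : l'.length + ([] : List (Int × Int)).length ≤ f := by simp at hf ⊢; omega
        have hfst' : ∀ x ∈ l', 0 ≤ x.1 := fun x hx => hfst x (List.mem_cons_of_mem _ hx)
        have hk' : k < (pvAddAt res li.1 j).length := by rw [pvAddAt_length]; exact hk
        simp only [mergeA]
        rw [ih l' [] j (pvAddAt res li.1 j) k hf' hfst' (List.pairwise_cons.mp hl).2 hr hk',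
          pvAddAt_getD res li.1 j k (hfst li List.mem_cons_self) hk]
        have h0 : pvCntLt li.2 ([] : List (Int × Int)) = 0 := by simp [pvCntLt]
        simp only [pvSm, h0]
        split_ifs <;> ring
      · by_cases h : li.2 ≤ rj.2
        · have hf' : l'.length + (rj :: r').length ≤ f := by simp at hf ⊢; omega
          have hfst' : ∀ x ∈ l', 0 ≤ x.1 := fun x hx => hfst x (List.mem_cons_of_mem _ hx)
          have hk' : k < (pvAddAt res li.1 j).length := by rw [pvAddAt_length]; exact hk
          simp only [mergeA, if_pos h]
          rw [ih l' (rj :: r') j (pvAddAt res li.1 j) k hf' hfst' (List.pairwise_cons.mp hl).2 hr hk',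
            pvAddAt_getD res li.1 j k (hfst li List.mem_cons_self) hk]
          have h0 : pvCntLt li.2 (rj :: r') = 0 := by
            apply pvCntLt_eq_zero
            intro y hy
            rcases List.mem_cons.mp hy with rfl | hy
            · exact not_lt.mpr h
            · exact not_lt.mpr (le_trans h ((List.pairwise_cons.mp hr).1 y hy))
          simp only [pvSm, h0]
          split_ifs <;> ring
        · have hf' : (li :: l').length + r'.length ≤ f := by simp at hf ⊢; omega
          simp only [mergeA, if_neg h]
          rw [ih (li :: l') r' (j + 1) res k hf' hfst hl (List.pairwise_cons.mp hr).2 hk]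
          congr 1
          have hgt : ∀ y ∈ li :: l', rj.2 < y.2 := by
            intro y hy
            rcases List.mem_cons.mp hy with rfl | hy
            · exact not_le.mp h
            · exact lt_of_lt_of_le (not_le.mp h) ((List.pairwise_cons.mp hl).1 y hy)
          rw [pvSm_shift (li :: l') rj r' j (k : Int) hgt]

theorem msortA_main : ∀ (f : Nat) (inp : List (Int × Int)) (res : List Int),
    inp.length ≤ f →
    (msortA f inp res).1.Perm inp ∧
    (msortA f inp res).1.Pairwise (fun a b => a.2 ≤ b.2) ∧
    (msortA f inp res).2.length = res.length ∧
    ((∀ x ∈ inp, 0 ≤ x.1) → ∀ k : Nat, k < res.length →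
      ((msortA f inp res).2).getD k 0 = res.getD k 0 + pvS inp (k : Int)) := by
  intro f
  induction f with
  | zero =>
    intro inp res hf
    rcases inp with _ | ⟨x, t⟩
    · exact ⟨List.Perm.refl _, by simp [msortA], by simp [msortA], by
        intro _ k hk; simp [msortA, pvS]⟩
    · simp at hf
  | succ f ih =>
    intro inp res hf
    by_cases h : inp.length ≤ 1
    · have hm : msortA (f + 1) inp res = (inp, res) := by rw [msortA]; simp [h]
      rw [hm]
      refine ⟨List.Perm.refl _, ?_, rfl, ?_⟩
      · rcases inp with _ | ⟨x, _ | ⟨y, t⟩⟩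
        · simp
        · simp
        · simp at h
      · intro _ k hk
        rcases inp with _ | ⟨x, _ | ⟨y, t⟩⟩
        · simp [pvS]
        · simp [pvS, pvCntLt]
        · simp at h
    · have hm1 : (inp.take (inp.length / 2)).length ≤ f := by
        simp only [List.length_take]; omega
      have ih1 := ih (inp.take (inp.length / 2)) res hm1
      obtain ⟨P1, S1, L1, G1⟩ := ih1
      have hm2 : (inp.drop (inp.length / 2)).length ≤ f := by
        simp only [List.length_drop]; omega
      have ih2 := ih (inp.drop (inp.length / 2)) (msortA f (inp.take (inp.length / 2)) res).2 hm2
      obtain ⟨P2, S2, L2, G2⟩ := ih2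
      have hm : msortA (f + 1) inp res =
          mergeA ((msortA f (inp.take (inp.length / 2)) res).1.length +
              (msortA f (inp.drop (inp.length / 2)) (msortA f (inp.take (inp.length / 2)) res).2).1.length)
            (msortA f (inp.take (inp.length / 2)) res).1
            (msortA f (inp.drop (inp.length / 2)) (msortA f (inp.take (inp.length / 2)) res).2).1 0
            (msortA f (inp.drop (inp.length / 2)) (msortA f (inp.take (inp.length / 2)) res).2).2 := by
        rw [msortA]
        simp only [if_neg h]
      rw [hm]
      have hfm : (msortA f (inp.take (inp.length / 2)) res).1.length +
          (msortA f (inp.drop (inp.length / 2)) (msortA f (inp.take (inp.length / 2)) res).2).1.length ≤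
          (msortA f (inp.take (inp.length / 2)) res).1.length +
          (msortA f (inp.drop (inp.length / 2)) (msortA f (inp.take (inp.length / 2)) res).2).1.length :=
        le_refl _
      obtain ⟨PM, LM⟩ := mergeA_fst_perm_length _ _ _ 0 _ hfm
      have hsplit : inp.take (inp.length / 2) ++ inp.drop (inp.length / 2) = inp :=
        List.take_append_drop _ inp
      refine ⟨?_, ?_, ?_, ?_⟩
      · exact PM.trans ((P1.append P2).trans (by rw [hsplit]))
      · exact mergeA_sorted _ _ _ 0 _ hfm S1 S2
      · rw [LM, L2, L1]
      · intro hfst k hk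
        have hfl : ∀ x ∈ inp.take (inp.length / 2), 0 ≤ x.1 :=
          fun x hx => hfst x (List.take_subset _ _ hx)
        have hfr : ∀ x ∈ inp.drop (inp.length / 2), 0 ≤ x.1 :=
          fun x hx => hfst x (List.drop_subset _ _ hx)
        have hf1 : ∀ x ∈ (msortA f (inp.take (inp.length / 2)) res).1, 0 ≤ x.1 :=
          fun x hx => hfl x (P1.mem_iff.mp hx)
        have hk2 : k < (msortA f (inp.take (inp.length / 2)) res).2.length := by
          rw [L1]; exact hk
        have hk3 : k < (msortA f (inp.drop (inp.length / 2))
            (msortA f (inp.take (inp.length / 2)) res).2).2.length := by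
          rw [L2, L1]; exact hk
        rw [mergeA_getD _ _ _ 0 _ k hfm hf1 S1 S2 hk3, G2 hfr k hk2, G1 hfl k hk]
        have e1 : pvSm (msortA f (inp.take (inp.length / 2)) res).1
              (msortA f (inp.drop (inp.length / 2)) (msortA f (inp.take (inp.length / 2)) res).2).1 0 (k : Int)
            = pvSm (inp.take (inp.length / 2)) (inp.drop (inp.length / 2)) 0 (k : Int) := by
          rw [pvSm_perm_left _ _ _ P1, pvSm_perm_right _ _ _ P2]
        rw [e1]
        conv_rhs => rw [← hsplit]
        rw [pvS_append]
        ring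

-- ===== VERDICT (by name: the statement is the Claim_ definition above) =====
theorem shorterBuildings_spec : Claim_equal_shorterBuildings := by
  intro heights _
  unfold Spec_shorterBuildings shorterBuildings shorterBuildings_alt
  obtain ⟨P, S, L, G⟩ := msortA_main (PySem.List.enumerate heights 0).length
    (PySem.List.enumerate heights 0) (List.replicate heights.length 0) (le_refl _)
  have hfst : ∀ x ∈ PySem.List.enumerate heights 0, 0 ≤ x.1 := by
    intro x hx
    obtain ⟨i, hi, rfl⟩ := (PySem.List.mem_enumerate_iff _ _ _).mp hx
    simp
  apply List.ext_getElem
  · rw [L]; simp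
  · intro k h1 h2
    have hk : k < heights.length := by simpa using h2
    have hres : k < (List.replicate heights.length (0 : Int)).length := by simpa using hk
    have hG := G hfst k hres
    have hE := pvS_enumerate heights k 0
    rw [zero_add] at hE
    rw [← List.getD_eq_getElem _ 0 h1, hG, hE]
    simp
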